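-- pv_equiv track=rewrite | github.com/pypi-data/pypi-mirror-51 | packages/signatory/signatory-1.0.0.tar.gz/signatory-1.0.0/src/signatory/logsignature_module.py | logsignature_channels
-- ===== SOURCE A (Python) =====
-- import math
--
-- def _get_prime_factors(x):
--     if x == 1:
--         return []
--     prime_factors = []
--     largest_i_so_far = 2
--     while True:
--         for i in range(largest_i_so_far, int(round(math.sqrt(x))) + 1):  # int needed for Py2 compatability
--             if x % i == 0:
--                 largest_i_so_far = i
--                 break
--         else:
--             prime_factors.append(x)  # x is prime
--             break
--         x = x // i
--         prime_factors.append(i)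
--     return prime_factors
--
-- def _mobius_function(x):
--     prime_factors = _get_prime_factors(x)
--     prev_elem = None
--     for elem in prime_factors:
--         if elem == prev_elem:
--             return 0
--         prev_elem = elem
--     num_unique_factors = len(set(prime_factors))
--     if num_unique_factors % 2 == 0:
--         return 1
--     else:
--         return -1
--
-- def logsignature_channels(in_channels, depth):
--     # type: (int, int) -> int
--     """Computes the number of output channels from a logsignature call with :attr:`mode in ("words", "brackets")`.
--
--     Arguments:
--         in_channels (int): The number of channels in the input; that is, the dimension of the space that the input path
--             resides in.
--
--         depth (int): The depth of the signature that is being computed.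
--
--     Returns:
--         An int specifying the number of channels in the logsignature of the path.
--     """
--
--     if in_channels < 1:
--         raise ValueError("in_channels must be at least 1")
--
--     if depth < 1:
--         raise ValueError("depth must be at least 1")
--
--     total = 0
--     for d in range(1, depth + 1):
--         subtotal = 0
--         for d_divisor in range(1, d + 1):
--             if d % d_divisor == 0:
--                 subtotal += _mobius_function(d // d_divisor) * in_channels ** d_divisor
--         total += subtotal // d
--     return total
-- ===== SOURCE B (Python) =====
-- def _mobius(x):
--     # Moebius function by trial division: 0 on a squared prime factor,
--     # otherwise (-1)^(number of prime factors).
--     sign = 1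
--     p = 2
--     while p * p <= x:
--         if x % p == 0:
--             x //= p
--             if x % p == 0:
--                 return 0
--             sign = -sign
--         p += 1
--     if x > 1:
--         sign = -sign
--     return sign
--
--
-- def logsignature_channels(in_channels, depth):
--     if in_channels < 1:
--         raise ValueError("in_channels must be at least 1")
--
--     if depth < 1:
--         raise ValueError("depth must be at least 1")
--
--     total = 0
--     for d in range(1, depth + 1):
--         s = 0
--         e = 1
--         while e * e <= d:
--             if d % e == 0:
--                 f = d // e
--                 s += _mobius(f) * in_channels ** e
--                 if f != e:
--                     s += _mobius(e) * in_channels ** f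
--             e += 1
--         total += s // d
--     return total
-- ===== Notes on version B (the rewrite author's own statement) =====
-- stated objective: alternative
-- what changed: Replaces A's repeated trial-division prime factorisation plus factor-list Moebius with a single-loop square-free trial division Moebius, and replaces A's O(d) divisibility scan per degree with divisor enumeration up to sqrt(d) in complementary pairs.
import Mathlib
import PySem

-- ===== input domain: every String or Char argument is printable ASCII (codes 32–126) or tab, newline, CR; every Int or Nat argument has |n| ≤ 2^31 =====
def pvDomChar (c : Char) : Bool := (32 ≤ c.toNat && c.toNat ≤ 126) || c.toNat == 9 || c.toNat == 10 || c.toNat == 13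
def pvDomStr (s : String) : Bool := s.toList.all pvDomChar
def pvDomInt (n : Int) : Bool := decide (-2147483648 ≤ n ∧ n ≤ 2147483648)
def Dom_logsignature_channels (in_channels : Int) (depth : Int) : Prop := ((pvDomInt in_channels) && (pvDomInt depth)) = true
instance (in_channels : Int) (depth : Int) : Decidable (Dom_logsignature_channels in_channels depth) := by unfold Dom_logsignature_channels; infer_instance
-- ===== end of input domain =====

-- B replaces A's repeated trial-division factorisation and per-degree divisibility scans by a
-- single-loop square-free Moebius test and divisor enumeration up to sqrt(d) in pairs (alternative).


-- ===== PORT A =====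

-- port of int(round(math.sqrt(x))): the integer nearest to √x.  Exact on the admitted domain
-- (x ≤ 2^31): float sqrt is correctly rounded and √x is never exactly a half-integer there.
def pyRoundSqrt (x : Nat) : Nat :=
  let s := Nat.sqrt x
  if s * (s + 1) < x then s + 1 else s

-- the inner 'for i in range(largest_i_so_far, int(round(math.sqrt(x))) + 1): if x % i == 0: break'
-- returns the first i in [i, bound] dividing x, none if the for-loop falls through to its else.
def aFindDiv (x i bound : Nat) : Option Nat :=
  if _h : i ≤ bound then
    if x % i = 0 then some i else aFindDiv x (i + 1) bound
  else none
termination_by bound + 1 - i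

theorem aFindDiv_some_spec (x i bound : Nat) :
    ∀ j, aFindDiv x i bound = some j →
      i ≤ j ∧ j ≤ bound ∧ x % j = 0 ∧ ∀ k, i ≤ k → k < j → x % k ≠ 0 := by
  fun_induction aFindDiv x i bound with
  | case1 i hle hdvd =>
    intro j hj
    simp only [Option.some.injEq] at hj
    subst hj
    exact ⟨le_refl _, hle, hdvd, fun k h1 h2 => absurd (lt_of_le_of_lt h1 h2) (lt_irrefl _)⟩
  | case2 i hle hdvd ih =>
    intro j hj
    obtain ⟨h1, h2, h3, h4⟩ := ih j hj
    refine ⟨by omega, h2, h3, fun k hk1 hk2 => ?_⟩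
    rcases Nat.eq_or_lt_of_le hk1 with rfl | hlt
    · exact hdvd
    · exact h4 k (by omega) hk2
  | case3 i hle => intro j hj; simp at hj

theorem pyRoundSqrt_le_succ (x : Nat) : pyRoundSqrt x ≤ Nat.sqrt x + 1 := by
  unfold pyRoundSqrt; dsimp only; split <;> omega

-- the 'while True' loop of _get_prime_factors; x's value decreases, largest_i_so_far stays ≥ 2
def aFactorLoop (x largest : Nat) (h2 : 2 ≤ largest) : List Nat :=
  match hfd : aFindDiv x largest (pyRoundSqrt x) with
  | none => [x]                     -- x is prime: append x, break
  | some i => i :: aFactorLoop (x / i) i (le_trans h2 (aFindDiv_some_spec _ _ _ i hfd).1)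
termination_by x
decreasing_by
  obtain ⟨h1, hb, -, -⟩ := aFindDiv_some_spec _ _ _ i hfd
  have hi2 : 2 ≤ i := le_trans h2 h1
  have hsq : 2 ≤ Nat.sqrt x + 1 :=
    le_trans (le_trans hi2 hb) (pyRoundSqrt_le_succ x)
  have hx1 : 1 ≤ x := by
    have : 1 * 1 ≤ x := Nat.le_sqrt.mp (by omega)
    omega
  exact Nat.div_lt_self (by omega) (by omega)

def aGetPrimeFactors (x : Nat) : List Nat :=
  if x = 1 then [] else aFactorLoop x 2 (by norm_num)

-- the prev_elem loop of _mobius_function (prev_elem starts as None)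
def aAdjDupLoop : Option Nat → List Nat → Bool
  | _, [] => false
  | prev, e :: rest => if prev = some e then true else aAdjDupLoop (some e) rest

-- port of _mobius_function; its Python argument is always a positive int here, carried as Nat
def aMobius (x : Nat) : Int :=
  let pf := aGetPrimeFactors x
  if aAdjDupLoop none pf then 0
  else if (PySem.Set.ofList pf).length % 2 = 0 then 1 else -1

-- the ValueError branches for in_channels < 1 and depth < 1 are excluded by Pre_;
-- loop indices d, d_divisor are positive, so .toNat on them and on d // d_divisor is exact.
def logsignature_channels (in_channels : Int) (depth : Int) : Int :=
  (PySem.List.pyRange 1 (depth + 1)).foldl (fun total d =>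
    total + PySem.Int.floordiv
      ((PySem.List.pyRange 1 (d + 1)).foldl (fun subtotal e =>
        if PySem.Int.mod d e = 0 then
          subtotal + aMobius (PySem.Int.floordiv d e).toNat * in_channels ^ e.toNat
        else subtotal) 0)
      d) 0

-- ===== PORT B =====

-- B's _mobius: single trial-division loop, early 0 on a repeated prime factor
def bMobiusLoop (x p : Nat) (sign : Int) : Int :=
  if h1 : p * p ≤ x then
    if h2 : x % p = 0 then
      if h3 : (x / p) % p = 0 then 0
      else bMobiusLoop (x / p) (p + 1) (-sign)
    else bMobiusLoop x (p + 1) sign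
  else if 1 < x then -sign else sign
termination_by (x, x + 1 - p)
decreasing_by
  · have hp2 : 2 ≤ p := by
      by_contra hcon
      interval_cases p
      · rw [Nat.mod_zero] at h2; subst h2; simp at h3
      · simp [Nat.mod_one] at h3

    have : p ≤ p * p := Nat.le_mul_of_pos_left p (by omega)
    exact Prod.Lex.left _ _ (Nat.div_lt_self (by omega) (by omega))
  · apply Prod.Lex.right
    rcases Nat.eq_zero_or_pos p with rfl | hp
    · omega
    · have : p ≤ p * p := Nat.le_mul_of_pos_left p hp
      omega

def bMobius (x : Nat) : Int := bMobiusLoop x 2 1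

-- B's per-degree divisor scan up to sqrt(d), adding each divisor pair (e, d//e)
def bInnerLoop (d : Nat) (c : Int) (e : Nat) (s : Int) : Int :=
  if e * e ≤ d then
    bInnerLoop d c (e + 1)
      (if d % e = 0 then
        (if d / e ≠ e then s + bMobius (d / e) * c ^ e + bMobius e * c ^ (d / e)
         else s + bMobius (d / e) * c ^ e)
       else s)
  else s
termination_by d + 1 - e
decreasing_by
  have : e ≤ d := by
    rcases Nat.eq_zero_or_pos e with h | h
    · omega
    · exact le_trans (Nat.le_mul_of_pos_left e h) ‹e * e ≤ d›
  omega

def logsignature_channels_alt (in_channels : Int) (depth : Int) : Int :=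
  (PySem.List.pyRange 1 (depth + 1)).foldl (fun total d =>
    total + PySem.Int.floordiv (bInnerLoop d.toNat in_channels 1 0) d) 0

-- ===== PRECONDITION & SPEC =====
-- Pre_ excludes exactly the inputs where A raises ValueError (in_channels < 1 or depth < 1).
def Pre_logsignature_channels (in_channels : Int) (depth : Int) : Prop :=
  1 ≤ in_channels ∧ 1 ≤ depth
instance (in_channels : Int) (depth : Int) : Decidable (Pre_logsignature_channels in_channels depth) := by
  unfold Pre_logsignature_channels; infer_instance

def pvWitness_logsignature_channels : Int × Int := (2, 4)

def Spec_logsignature_channels (in_channels : Int) (depth : Int) (out : Int) : Prop := out = logsignature_channels_alt in_channels depth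
instance (in_channels : Int) (depth : Int) (out : Int) : Decidable (Spec_logsignature_channels in_channels depth out) := by unfold Spec_logsignature_channels; infer_instance

-- ===== CLAIM (what is proved, stated in full; the proofs are below) =====
def Claim_equal_logsignature_channels : Prop := ∀ (in_channels : Int) (depth : Int), Dom_logsignature_channels in_channels depth → Pre_logsignature_channels in_channels depth → Spec_logsignature_channels in_channels depth (logsignature_channels in_channels depth)

-- ===== LEMMAS AND PROOFS =====

theorem aFindDiv_none_spec (x i bound : Nat) :
    aFindDiv x i bound = none → ∀ k, i ≤ k → k ≤ bound → x % k ≠ 0 := by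
  fun_induction aFindDiv x i bound with
  | case1 i hle hdvd => intro h; simp at h
  | case2 i hle hdvd ih =>
    intro h k hk1 hk2
    rcases Nat.eq_or_lt_of_le hk1 with rfl | hlt
    · exact hdvd
    · exact ih h k (by omega) hk2
  | case3 i hle => intro _ k hk1 hk2; omega

theorem sqrt_le_pyRoundSqrt (x : Nat) : Nat.sqrt x ≤ pyRoundSqrt x := by
  unfold pyRoundSqrt; dsimp only; split <;> omega

-- the reference value both Moebius implementations compute: 0 unless x is square-free,
-- else (-1)^(number of prime factors)
def muSpec (x : Nat) : Int :=
  if (Nat.primeFactorsList x).Nodup then (-1) ^ (Nat.primeFactorsList x).length else 0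

-- the common value of both inner loops: ∑_{e ∣ n} μ(n/e) · c^e
def muSum (n : Nat) (c : Int) : Int := ∑ e ∈ n.divisors, muSpec (n / e) * c ^ e

theorem pyRoundSqrt_lt {x : Nat} (hx : 2 ≤ x) : pyRoundSqrt x < x := by
  have hs := Nat.sqrt_lt_self (by omega : 1 < x)
  unfold pyRoundSqrt; dsimp only
  split
  · rename_i h
    by_contra hcon
    have hx1 : Nat.sqrt x = x - 1 := by omega
    rw [hx1] at h
    nlinarith [Nat.sub_add_cancel (by omega : 1 ≤ x)]
  · omega
theorem pfl_cons {x : Nat} (hx : 2 ≤ x) :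
    Nat.primeFactorsList x = x.minFac :: Nat.primeFactorsList (x / x.minFac) := by
  obtain ⟨n, rfl⟩ : ∃ n, x = n + 2 := ⟨x - 2, by omega⟩
  exact Nat.primeFactorsList_add_two n

theorem prime_of_minFac_gt_sqrt {x : Nat} (hx : 2 ≤ x) (h : Nat.sqrt x < Nat.minFac x) :
    Nat.Prime x := by
  by_contra hnp
  have := Nat.minFac_sq_le_self (by omega) hnp
  have : Nat.minFac x ≤ Nat.sqrt x := Nat.le_sqrt.mpr (by nlinarith)
  omega

theorem aFactorLoop_eq (x : Nat) : ∀ largest (h2 : 2 ≤ largest), 2 ≤ x →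
    (∀ p, Nat.Prime p → p ∣ x → largest ≤ p) →
    aFactorLoop x largest h2 = Nat.primeFactorsList x := by
  induction x using Nat.strong_induction_on with
  | _ x ih =>
    intro largest h2 hx hmin
    rw [aFactorLoop]
    split
    next hfd =>
      have hprime : Nat.Prime x := by
        apply prime_of_minFac_gt_sqrt hx
        by_contra hcon
        push_neg at hcon
        have hmfp := Nat.minFac_prime (by omega : x ≠ 1)
        have hge : largest ≤ x.minFac := hmin _ hmfp (Nat.minFac_dvd x)
        exact aFindDiv_none_spec _ _ _ hfd _ hge
          (le_trans hcon (sqrt_le_pyRoundSqrt x))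
          (Nat.dvd_iff_mod_eq_zero.mp (Nat.minFac_dvd x))
      rw [Nat.primeFactorsList_prime hprime]
    next i hfd =>
      obtain ⟨h1, hb, hmod, hminimal⟩ := aFindDiv_some_spec _ _ _ i hfd
      have hidvd : i ∣ x := Nat.dvd_of_mod_eq_zero hmod
      have hi2 : 2 ≤ i := le_trans h2 h1
      have himin : i = Nat.minFac x := by
        have hle : Nat.minFac x ≤ i := Nat.minFac_le_of_dvd hi2 hidvd
        rcases Nat.eq_or_lt_of_le hle with h | h
        · exact h.symm
        · exfalso
          have hmfp := Nat.minFac_prime (by omega : x ≠ 1)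
          have hge : largest ≤ x.minFac := hmin _ hmfp (Nat.minFac_dvd x)
          exact hminimal _ hge h
            (Nat.dvd_iff_mod_eq_zero.mp (Nat.minFac_dvd x))
      have hilt : i < x := lt_of_le_of_lt hb (pyRoundSqrt_lt hx)
      have hmul : x / i * i = x := Nat.div_mul_cancel hidvd
      have hxi2 : 2 ≤ x / i := by
        have h0 : ¬ x / i ≤ 1 := by intro h; nlinarith [hmul]
        omega
      rw [pfl_cons hx, ← himin]
      congr 1
      apply ih (x / i) (Nat.div_lt_self (by omega) (by omega)) i hi2 hxi2
      intro p hp hpd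
      rw [himin]
      exact Nat.minFac_le_of_dvd hp.two_le (dvd_trans hpd (Nat.div_dvd_of_dvd hidvd))
theorem aGetPrimeFactors_eq {x : Nat} (hx : 1 ≤ x) :
    aGetPrimeFactors x = Nat.primeFactorsList x := by
  unfold aGetPrimeFactors
  split
  · rename_i h; rw [h, Nat.primeFactorsList_one]
  · rename_i h
    exact aFactorLoop_eq x 2 (by norm_num) (by omega) (fun p hp _ => hp.two_le)
theorem adjLoop_some_false_iff : ∀ (l : List Nat) (a : Nat), List.IsChain (· ≤ ·) (a :: l) →
    (aAdjDupLoop (some a) l = false ↔ List.IsChain (· < ·) (a :: l)) := by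
  intro l
  induction l with
  | nil => intro a _; simp [aAdjDupLoop]
  | cons b t ih =>
    intro a hle
    rw [List.isChain_cons_cons] at hle
    rw [aAdjDupLoop]
    rw [List.isChain_cons_cons]
    by_cases hab : a = b
    · subst hab
      simp
    · rw [if_neg (by simp [hab]), ih b hle.2]
      have h1 : a < b := lt_of_le_of_ne hle.1 hab
      simp [h1]
theorem adjLoop_none_false_iff {l : List Nat} (h : List.IsChain (· ≤ ·) l) :
    aAdjDupLoop none l = false ↔ List.IsChain (· < ·) l := by
  cases l with
  | nil => simp [aAdjDupLoop]
  | cons a t =>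
    rw [aAdjDupLoop]
    simp only [reduceCtorEq]
    exact adjLoop_some_false_iff t a h
theorem chain_lt_iff_nodup : ∀ {l : List Nat}, List.IsChain (· ≤ ·) l →
    (List.IsChain (· < ·) l ↔ l.Nodup) := by
  intro l hle
  constructor
  · intro h
    exact (h.pairwise.imp fun h => ne_of_lt h)
  · intro hnd
    induction l with
    | nil => exact .nil
    | cons a t ih =>
      cases t with
      | nil => simp
      | cons b u =>
        rw [List.isChain_cons_cons] at hle ⊢
        refine ⟨lt_of_le_of_ne hle.1 ?_, ih hle.2 hnd.of_cons⟩
        intro hab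
        exact (List.nodup_cons.mp hnd).1 (hab ▸ List.mem_cons_self)
theorem neg_one_pow_mod (n : Nat) :
    ((-1 : Int) ^ n) = if n % 2 = 0 then 1 else -1 := by
  split
  · exact Even.neg_one_pow (Nat.even_iff.mpr (by omega))
  · exact Odd.neg_one_pow (Nat.odd_iff.mpr (by omega))

theorem aMobius_eq {x : Nat} (hx : 1 ≤ x) : aMobius x = muSpec x := by
  simp only [aMobius]
  rw [aGetPrimeFactors_eq hx]
  have hch : List.IsChain (· ≤ ·) (Nat.primeFactorsList x) := Nat.isChain_primeFactorsList x
  by_cases hnd : (Nat.primeFactorsList x).Nodup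
  · have hfalse : aAdjDupLoop none (Nat.primeFactorsList x) = false :=
      (adjLoop_none_false_iff hch).mpr ((chain_lt_iff_nodup hch).mpr hnd)
    rw [hfalse]
    simp only [Bool.false_eq_true, if_false]
    rw [PySem.Set.ofList_eq_self_of_nodup _ hnd]
    rw [muSpec, if_pos hnd, neg_one_pow_mod]
  · have htrue : aAdjDupLoop none (Nat.primeFactorsList x) = true := by
      by_contra h
      exact hnd ((chain_lt_iff_nodup hch).mp
        ((adjLoop_none_false_iff hch).mp (by simpa using h)))
    rw [htrue]
    simp [muSpec, hnd]
theorem muSpec_one : muSpec 1 = 1 := by simp [muSpec]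

theorem muSpec_prime {p : Nat} (hp : Nat.Prime p) : muSpec p = -1 := by
  simp [muSpec, Nat.primeFactorsList_prime hp]

theorem prime_of_min_dvd {x p : Nat} (hp2 : 2 ≤ p) (hdvd : p ∣ x)
    (hmin : ∀ q, Nat.Prime q → q ∣ x → p ≤ q) : Nat.Prime p := by
  have hq : Nat.Prime p.minFac := Nat.minFac_prime (by omega)
  have h1 : p.minFac ∣ x := dvd_trans (Nat.minFac_dvd p) hdvd
  have h2 : p ≤ p.minFac := hmin _ hq h1
  have h3 : p.minFac ≤ p := Nat.minFac_le (by omega)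
  exact Nat.prime_def_minFac.mpr ⟨hp2, by omega⟩

theorem muSpec_of_sq {x p : Nat} (hx : 1 ≤ x) (hp : Nat.Prime p) (h1 : p ∣ x)
    (h2 : p ∣ x / p) : muSpec x = 0 := by
  have hsq : p ^ 2 ∣ x := by
    obtain ⟨k, rfl⟩ := h1
    rw [Nat.mul_div_cancel_left k hp.pos] at h2
    obtain ⟨m, rfl⟩ := h2
    exact ⟨m, by ring⟩
  have hf : 2 ≤ x.factorization p :=
    (hp.pow_dvd_iff_le_factorization (by omega)).mp hsq
  have hc : 2 ≤ (Nat.primeFactorsList x).count p := by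
    rw [Nat.primeFactorsList_count_eq]; exact hf
  have : ¬ (Nat.primeFactorsList x).Nodup := by
    intro hnd
    have := List.nodup_iff_count_le_one.mp hnd p
    omega
  simp [muSpec, this]
theorem muSpec_div {x p : Nat} (hx : 2 ≤ x) (hmin : p = Nat.minFac x) (h2 : ¬ p ∣ x / p) :
    muSpec x = - muSpec (x / p) := by
  have hcons := pfl_cons hx
  rw [← hmin] at hcons
  have hpmem : p ∉ Nat.primeFactorsList (x / p) := by
    intro hmem
    exact h2 (Nat.dvd_of_mem_primeFactorsList hmem)
  unfold muSpec
  rw [hcons]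
  by_cases hnd : (Nat.primeFactorsList (x / p)).Nodup
  · rw [if_pos (List.nodup_cons.mpr ⟨hpmem, hnd⟩), if_pos hnd]
    simp [pow_succ]
  · rw [if_neg (fun h => hnd (List.nodup_cons.mp h).2), if_neg hnd]
    ring
theorem bMobiusLoop_eq (x p : Nat) (sign : Int) : 2 ≤ p → 1 ≤ x →
    (∀ q, Nat.Prime q → q ∣ x → p ≤ q) → bMobiusLoop x p sign = sign * muSpec x := by
  fun_induction bMobiusLoop x p sign with
  | case1 x p sign h1 h2 h3 =>
    intro hp hx hmin
    have hpd : p ∣ x := Nat.dvd_of_mod_eq_zero h2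
    have hprime : Nat.Prime p := prime_of_min_dvd hp hpd hmin
    rw [muSpec_of_sq hx hprime hpd (Nat.dvd_of_mod_eq_zero h3)]
    ring
  | case2 x p sign h1 h2 h3 ih =>
    intro hp hx hmin
    have hpd : p ∣ x := Nat.dvd_of_mod_eq_zero h2
    have hprime : Nat.Prime p := prime_of_min_dvd hp hpd hmin
    have hx4 : 4 ≤ x := le_trans (by nlinarith) h1
    have hxp1 : 1 ≤ x / p := (Nat.one_le_div_iff (by omega)).mpr (Nat.le_of_dvd (by omega) hpd)
    have hndvd : ¬ p ∣ x / p := fun h =>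
      h3 (Nat.dvd_iff_mod_eq_zero.mp h)
    have hmin' : ∀ q, Nat.Prime q → q ∣ x / p → p + 1 ≤ q := by
      intro q hq hqd
      have hqx : q ∣ x := dvd_trans hqd (Nat.div_dvd_of_dvd hpd)
      have hle := hmin q hq hqx
      rcases Nat.eq_or_lt_of_le hle with rfl | h
      · exact absurd hqd hndvd
      · omega
    rw [ih (by omega) hxp1 hmin']
    have hminfac : p = Nat.minFac x := by
      have h1' : Nat.minFac x ≤ p := Nat.minFac_le_of_dvd hp hpd
      have h2' : p ≤ Nat.minFac x :=
        hmin _ (Nat.minFac_prime (by omega)) (Nat.minFac_dvd x)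
      omega
    rw [muSpec_div (by omega : 2 ≤ x) hminfac hndvd]
    ring
  | case3 x p sign h1 h2 ih =>
    intro hp hx hmin
    apply ih (by omega) hx
    intro q hq hqd
    have hle := hmin q hq hqd
    rcases Nat.eq_or_lt_of_le hle with rfl | h
    · exact absurd (Nat.dvd_iff_mod_eq_zero.mp hqd) h2
    · omega
  | case4 x p sign h1 hx1 =>
    intro hp hx hmin
    have hprime : Nat.Prime x := by
      apply prime_of_minFac_gt_sqrt (by omega)
      have hge : p ≤ x.minFac := hmin _ (Nat.minFac_prime (by omega)) (Nat.minFac_dvd x)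
      have hsp : Nat.sqrt x < p := by
        by_contra hcon
        push_neg at hcon
        exact h1 (Nat.le_sqrt.mp hcon)
      omega
    rw [muSpec_prime hprime]
    ring
  | case5 x p sign h1 hx1 =>
    intro hp hx hmin
    have hx2 : x = 1 := by omega
    subst hx2
    rw [muSpec_one]
    ring
theorem bMobius_eq {x : Nat} (hx : 1 ≤ x) : bMobius x = muSpec x := by
  have := bMobiusLoop_eq x 2 1 (le_refl 2) hx (fun q hq _ => hq.two_le)
  rw [bMobius, this, one_mul]
theorem a_inner_partial (n : Nat) (c : Int) : ∀ m : Nat,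
    (PySem.List.pyRange 1 ((m : Int) + 1)).foldl (fun subtotal e =>
      if PySem.Int.mod (n : Int) e = 0 then
        subtotal + aMobius (PySem.Int.floordiv (n : Int) e).toNat * c ^ e.toNat
      else subtotal) 0
    = ∑ e ∈ Finset.Ico 1 (m + 1), (if e ∣ n then aMobius (n / e) * c ^ e else 0) := by
  intro m
  induction m with
  | zero => rfl
  | succ m ih =>
    have hc : ((m + 1 : Nat) : Int) + 1 = (((m : Nat) : Int) + 1) + 1 := by push_cast; ring
    have hm1 : (((m : Nat) : Int) + 1) = ((m + 1 : Nat) : Int) := by push_cast; ring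
    rw [hc, PySem.List.pyRange_one_succ_right (by omega), List.foldl_append, ih]
    rw [Finset.sum_Ico_succ_top (by omega : 1 ≤ m + 1)]
    simp only [List.foldl_cons, List.foldl_nil, hm1, PySem.Int.mod_natCast,
      PySem.Int.floordiv_natCast, Int.toNat_natCast, Int.natCast_eq_zero]
    by_cases hdvd : (m + 1) ∣ n
    · rw [if_pos (Nat.dvd_iff_mod_eq_zero.mp hdvd), if_pos hdvd]
    · rw [if_neg (fun h => hdvd (Nat.dvd_iff_mod_eq_zero.mpr h)), if_neg hdvd, add_zero]

theorem a_inner_eq (n : Nat) (hn : 1 ≤ n) (c : Int) :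
    (PySem.List.pyRange 1 ((n : Int) + 1)).foldl (fun subtotal e =>
      if PySem.Int.mod (n : Int) e = 0 then
        subtotal + aMobius (PySem.Int.floordiv (n : Int) e).toNat * c ^ e.toNat
      else subtotal) 0 = muSum n c := by
  rw [a_inner_partial n c n]
  have hsum : ∀ e ∈ Finset.Ico 1 (n + 1),
      (if e ∣ n then aMobius (n / e) * c ^ e else 0)
      = (if e ∣ n then muSpec (n / e) * c ^ e else 0) := by
    intro e he
    by_cases hd : e ∣ n
    · simp only [Finset.mem_Ico] at he
      rw [if_pos hd, if_pos hd,
        aMobius_eq ((Nat.one_le_div_iff (by omega)).mpr (Nat.le_of_dvd (by omega) hd))]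
    · rw [if_neg hd, if_neg hd]
  rw [Finset.sum_congr rfl hsum, muSum]
  have hdiv : n.divisors = (Finset.Ico 1 (n + 1)).filter (· ∣ n) := rfl
  rw [hdiv, Finset.sum_filter]

theorem b_inner_partial (n : Nat) (hn : 1 ≤ n) (c : Int) : ∀ e s, 1 ≤ e →
    bInnerLoop n c e s = s + ∑ k ∈ Finset.Ico e (Nat.sqrt n + 1),
      (if k ∣ n then (muSpec (n / k) * c ^ k +
        if n / k ≠ k then muSpec k * c ^ (n / k) else 0) else 0) := by
  intro e s
  fun_induction bInnerLoop n c e s with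
  | case1 e s h1 ih =>
    intro he
    simp only [dite_eq_ite] at ih
    rw [ih (by omega)]
    rw [Finset.sum_eq_sum_Ico_succ_bot
      (show e < Nat.sqrt n + 1 by have := Nat.le_sqrt.mpr h1; omega)]
    by_cases hdvd : e ∣ n
    · have hz : n % e = 0 := Nat.dvd_iff_mod_eq_zero.mp hdvd
      have hepos : 0 < e := by omega
      have hle : e ≤ n := Nat.le_of_dvd (by omega) hdvd
      have h1e : 1 ≤ n / e := (Nat.one_le_div_iff hepos).mpr hle
      rw [if_pos hz, if_pos hdvd, bMobius_eq h1e, bMobius_eq he]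
      by_cases hne : n / e ≠ e
      · rw [if_pos hne, if_pos hne]
        ring
      · rw [if_neg hne, if_neg hne]
        ring
    · have hz : ¬ n % e = 0 := fun h => hdvd (Nat.dvd_iff_mod_eq_zero.mpr h)
      rw [if_neg hz, if_neg hdvd]
      ring
  | case2 e s h1 =>
    intro he
    rw [Finset.Ico_eq_empty (by
      have : ¬ e ≤ Nat.sqrt n := fun h => h1 (Nat.le_sqrt.mp h)
      omega)]
    simp

theorem b_pairing (n : Nat) (hn : 1 ≤ n) (c : Int) :
    (∑ k ∈ Finset.Ico 1 (Nat.sqrt n + 1),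
      (if k ∣ n then (muSpec (n / k) * c ^ k +
        if n / k ≠ k then muSpec k * c ^ (n / k) else 0) else 0)) = muSum n c := by
  rw [← Finset.sum_filter]
  have hS : (Finset.Ico 1 (Nat.sqrt n + 1)).filter (· ∣ n)
      = n.divisors.filter (fun k => k * k ≤ n) := by
    ext k
    simp only [Finset.mem_filter, Finset.mem_Ico, Nat.mem_divisors]
    constructor
    · rintro ⟨⟨hk1, hk2⟩, hk3⟩
      exact ⟨⟨hk3, by omega⟩, Nat.le_sqrt.mp (by omega)⟩
    · rintro ⟨⟨hk1, hk2⟩, hk3⟩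
      have hk0 : k ≠ 0 := by
        rintro rfl
        exact hk2 (Nat.eq_zero_of_zero_dvd hk1)
      have := Nat.le_sqrt.mpr hk3
      exact ⟨⟨by omega, by omega⟩, hk1⟩
  rw [hS, Finset.sum_add_distrib]
  have h2nd : (∑ k ∈ n.divisors.filter (fun k => k * k ≤ n),
        (if n / k ≠ k then muSpec k * c ^ (n / k) else 0))
      = ∑ k ∈ n.divisors.filter (fun k => ¬ k * k ≤ n), muSpec (n / k) * c ^ k := by
    rw [← Finset.sum_filter, Finset.filter_filter]
    apply Finset.sum_nbij' (i := fun k => n / k) (j := fun k => n / k)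
    · intro k hk
      simp only [Finset.mem_filter, Nat.mem_divisors] at hk ⊢
      obtain ⟨⟨hd, hn0⟩, hsq, hne⟩ := hk
      have hkpos : 0 < k := Nat.pos_of_dvd_of_pos hd (by omega)
      have hmul : k * (n / k) = n := Nat.mul_div_cancel' hd
      have hlek : k ≤ n / k := Nat.le_of_mul_le_mul_left (by omega) hkpos
      have hlt : k < n / k := lt_of_le_of_ne hlek (Ne.symm hne)
      have hq : 0 < n / k := by omega
      refine ⟨⟨Nat.div_dvd_of_dvd hd, hn0⟩, ?_⟩
      intro hcon
      nlinarith
    · intro k hk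
      simp only [Finset.mem_filter, Nat.mem_divisors] at hk ⊢
      obtain ⟨⟨hd, hn0⟩, hsq⟩ := hk
      have hkpos : 0 < k := Nat.pos_of_dvd_of_pos hd (by omega)
      have hmul : k * (n / k) = n := Nat.mul_div_cancel' hd
      have hlt : n / k < k := by
        by_contra hcon
        push_neg at hcon
        exact hsq (by nlinarith)
      have hsq' : (n / k) * (n / k) ≤ n := by nlinarith
      have hdd : n / (n / k) = k := Nat.div_div_self hd hn0
      refine ⟨⟨Nat.div_dvd_of_dvd hd, hn0⟩, hsq', ?_⟩
      rw [hdd]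
      intro hcon
      exact hsq (by nlinarith [hcon])
    · intro k hk
      simp only [Finset.mem_filter, Nat.mem_divisors] at hk
      exact Nat.div_div_self hk.1.1 hk.1.2
    · intro k hk
      simp only [Finset.mem_filter, Nat.mem_divisors] at hk
      exact Nat.div_div_self hk.1.1 hk.1.2
    · intro k hk
      simp only [Finset.mem_filter, Nat.mem_divisors] at hk
      rw [Nat.div_div_self hk.1.1 hk.1.2]
  rw [h2nd, Finset.sum_filter_add_sum_filter_not]
  rfl

theorem b_inner_eq (n : Nat) (hn : 1 ≤ n) (c : Int) :
    bInnerLoop n c 1 0 = muSum n c := by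
  rw [b_inner_partial n hn c 1 0 (le_refl 1), zero_add, b_pairing n hn c]

-- ===== VERDICT (by name: the statement is the Claim_ definition above) =====
theorem logsignature_channels_spec : Claim_equal_logsignature_channels := by
  intro c depth _hdom hpre
  unfold Spec_logsignature_channels logsignature_channels logsignature_channels_alt
  apply PySem.List.foldl_congr_mem
  intro acc d hdmem
  have hd1 : 1 ≤ d ∧ d < depth + 1 := PySem.List.mem_pyRange_one.mp hdmem
  obtain ⟨m, rfl⟩ : ∃ m : Nat, d = (m : Int) := ⟨d.toNat, by omega⟩
  have h1m : 1 ≤ m := by omega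
  have : (((m : Int)).toNat) = m := by omega
  rw [this, a_inner_eq m h1m c, b_inner_eq m h1m c]
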